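-- pv_equiv track=rewrite | github.com/aaryan0bb/financial-pdf-analyzer | pdf_enrich_pipeline_stats.py | page_text_map
-- ===== SOURCE A (Python) =====
-- from typing import Dict, List, Tuple, NamedTuple, TYPE_CHECKING
--
-- PAGE_DELIM = "page_end"
--
-- def page_text_map(llm_text: str) -> Dict[int, str]:
--     lines = llm_text.splitlines()
--     mp: Dict[int, str] = {}
--     buf: List[str] = []
--     page = 1
--
--     for line in lines:
--         if line.startswith(PAGE_DELIM):
--             mp[page] = "\n".join(buf)
--             buf = []
--             page += 1
--         else:
--             buf.append(line)
--
--     if buf: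
--         mp[page] = "\n".join(buf)
--
--     return mp
-- ===== SOURCE B (Python) =====
-- PAGE_DELIM = "page_end"
--
-- def page_text_map(llm_text: str):
--     def first_delim(lines):
--         for i, l in enumerate(lines):
--             if l.startswith(PAGE_DELIM):
--                 return i
--         return None
--
--     def go(lines, page):
--         i = first_delim(lines)
--         if i is None:
--             return [(page, "\n".join(lines))] if lines else []
--         return [(page, "\n".join(lines[:i]))] + go(lines[i + 1:], page + 1)
--
--     return dict(go(llm_text.splitlines(), 1))
-- ===== Notes on version B (the rewrite author's own statement) =====
-- stated objective: alternative
-- what changed: Replaces A's single accumulator loop (growing buffer, page counter, dict mutation) by a recursive decomposition that finds the first delimiter line, emits the slice before it, and recurses on the remainder, building the page list directly.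
import Mathlib
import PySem

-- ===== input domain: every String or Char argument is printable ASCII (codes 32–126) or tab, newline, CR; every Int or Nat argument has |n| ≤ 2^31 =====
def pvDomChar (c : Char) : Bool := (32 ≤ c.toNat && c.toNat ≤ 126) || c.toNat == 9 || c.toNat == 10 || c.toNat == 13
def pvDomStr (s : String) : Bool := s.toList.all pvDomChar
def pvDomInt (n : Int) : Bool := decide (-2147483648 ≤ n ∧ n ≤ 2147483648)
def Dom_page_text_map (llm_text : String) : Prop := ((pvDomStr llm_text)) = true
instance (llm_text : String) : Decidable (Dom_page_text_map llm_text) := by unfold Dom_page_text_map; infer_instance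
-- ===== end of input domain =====

-- B replaces A's accumulator loop (buffer + page counter + dict mutation) by a recursive
-- split-at-first-delimiter decomposition; objective: alternative (same linear cost).

-- ===== PORT A =====
-- one step of A's for-loop over lines; state = (mp, buf, page)
def pageStepA (s : PySem.Dict Int String × List String × Int) (line : String) :
    PySem.Dict Int String × List String × Int :=
  if PySem.Str.startswith line "page_end" then
    (s.1.insert s.2.2 (PySem.Str.join "\n" s.2.1), [], s.2.2 + 1)
  else
    (s.1, s.2.1 ++ [line], s.2.2)

def page_text_map (llm_text : String) : List (Int × String) :=
  let lines := PySem.Str.splitlines llm_text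
  let s := lines.foldl pageStepA (PySem.Dict.empty, [], 1)
  let mp := if s.2.1 ≠ [] then s.1.insert s.2.2 (PySem.Str.join "\n" s.2.1) else s.1
  mp.items

-- ===== PORT B =====
-- Source B's first_delim: index of the first line starting with "page_end", else None
def firstDelim : List String → Option Nat
  | [] => none
  | l :: ls =>
    if PySem.Str.startswith l "page_end" then some 0
    else (firstDelim ls).map (· + 1)

theorem firstDelim_lt {ls : List String} {i : Nat} (h : firstDelim ls = some i) :
    i < ls.length := by
  induction ls generalizing i with
  | nil => simp [firstDelim] at h
  | cons l ls ih =>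
    simp only [firstDelim] at h
    split at h
    · cases h; simp
    · rcases Option.map_eq_some_iff.mp h with ⟨j, hj, rfl⟩
      have := ih hj; simp; omega

-- Source B's go: lines[:i] / lines[i+1:] are take i / drop (i+1) (0 ≤ i < len lines), exact here
def goPages (lines : List String) (page : Int) : List (Int × String) :=
  match h : firstDelim lines with
  | none => if lines ≠ [] then [(page, PySem.Str.join "\n" lines)] else []
  | some i => (page, PySem.Str.join "\n" (lines.take i)) :: goPages (lines.drop (i + 1)) (page + 1)
termination_by lines.length
decreasing_by
  have := firstDelim_lt h
  simp [List.length_drop]; omega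

def page_text_map_alt (llm_text : String) : List (Int × String) :=
  (PySem.Dict.ofList (goPages (PySem.Str.splitlines llm_text) 1)).items

-- ===== PRECONDITION & SPEC =====
def Spec_page_text_map (llm_text : String) (out : List (Int × String)) : Prop := out = page_text_map_alt llm_text
instance (llm_text : String) (out : List (Int × String)) : Decidable (Spec_page_text_map llm_text out) := by unfold Spec_page_text_map; infer_instance

-- ===== CLAIM (what is proved, stated in full; the proofs are below) =====
def Claim_equal_page_text_map : Prop := ∀ (llm_text : String), Dom_page_text_map llm_text → Spec_page_text_map llm_text (page_text_map llm_text)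

-- ===== LEMMAS AND PROOFS =====

theorem goPages_of_none {lines : List String} (page : Int) (h : firstDelim lines = none) :
    goPages lines page = if lines ≠ [] then [(page, PySem.Str.join "\n" lines)] else [] := by
  rw [goPages.eq_def]
  split
  · rfl
  · rename_i i h'; rw [h] at h'; cases h'

theorem goPages_of_some {lines : List String} (page : Int) {i : Nat}
    (h : firstDelim lines = some i) :
    goPages lines page
      = (page, PySem.Str.join "\n" (lines.take i)) :: goPages (lines.drop (i + 1)) (page + 1) := by
  rw [goPages.eq_def]
  split
  · rename_i h'; rw [h] at h'; cases h'
  · rename_i j h'; rw [h] at h'; cases h'; rfl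

theorem firstDelim_none {ls : List String}
    (h : ∀ l ∈ ls, PySem.Str.startswith l "page_end" = false) : firstDelim ls = none := by
  induction ls with
  | nil => rfl
  | cons l ls ih =>
    simp only [firstDelim, h l (by simp)]
    simp [ih fun x hx => h x (by simp [hx])]

theorem firstDelim_append {buf : List String} {l : String} {ls : List String}
    (hbuf : ∀ x ∈ buf, PySem.Str.startswith x "page_end" = false)
    (hl : PySem.Str.startswith l "page_end" = true) :
    firstDelim (buf ++ l :: ls) = some buf.length := by
  induction buf with
  | nil =>
    rw [List.nil_append]
    simp only [firstDelim]
    rw [hl]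
    simp
  | cons b bs ih =>
    simp only [List.cons_append, firstDelim, hbuf b (by simp)]
    rw [ih fun x hx => hbuf x (by simp [hx])]
    simp

theorem goPages_ge (lines : List String) (page : Int) :
    ∀ p ∈ goPages lines page, page ≤ p.1 := by
  fun_induction goPages lines page with
  | case1 lines page h hne => intro p hp; simp only [List.mem_singleton] at hp; simp [hp]
  | case2 lines page h hne => simp
  | case3 lines page i h ih =>
    intro p hp
    rcases List.mem_cons.mp hp with rfl | hp
    · simp
    · have := ih p hp; omega

theorem goPages_keys_nodup (lines : List String) (page : Int) :
    ((goPages lines page).map Prod.fst).Nodup := by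
  fun_induction goPages lines page with
  | case1 lines page h hne => simp
  | case2 lines page h hne => simp
  | case3 lines page i h ih =>
    simp only [List.map_cons, List.nodup_cons]
    refine ⟨?_, ih⟩
    intro hmem
    rcases List.mem_map.mp hmem with ⟨p, hp, hfst⟩
    have h1 := goPages_ge _ _ p hp
    omega

-- main loop invariant: A's fold over the remaining lines, starting from dict d, buffer buf
-- (no delimiter line in it) and current page, finishes as d.items ++ goPages (buf ++ lines) page
theorem loop_eq (lines : List String) (d : PySem.Dict Int String) (buf : List String) (page : Int)
    (hbuf : ∀ l ∈ buf, PySem.Str.startswith l "page_end" = false)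
    (hkeys : ∀ k ∈ d.keys, k < page) :
    (let s := lines.foldl pageStepA (d, buf, page)
     (if s.2.1 ≠ [] then s.1.insert s.2.2 (PySem.Str.join "\n" s.2.1) else s.1).items)
      = d.items ++ goPages (buf ++ lines) page := by
  induction lines generalizing d buf page with
  | nil =>
    have hfd : firstDelim buf = none := firstDelim_none hbuf
    have hnc : d.contains page = false := by
      rw [PySem.Dict.contains_eq_decide_mem_keys]
      simp only [decide_eq_false_iff_not]
      intro hmem; exact absurd (hkeys page hmem) (lt_irrefl page)
    simp only [List.foldl_nil, List.append_nil]
    rw [goPages_of_none page hfd]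
    by_cases hb : buf = []
    · simp [hb]
    · simp only [hb, ne_eq, not_false_eq_true, if_pos]
      rw [PySem.Dict.items_insert_of_not_contains d _ hnc]
  | cons l ls ih =>
    by_cases hl : PySem.Str.startswith l "page_end" = true
    · have hnc : d.contains page = false := by
        rw [PySem.Dict.contains_eq_decide_mem_keys]
        simp only [decide_eq_false_iff_not]
        intro hmem; exact absurd (hkeys page hmem) (lt_irrefl page)
      simp only [List.foldl_cons, pageStepA, hl, if_pos]
      rw [ih _ [] (page + 1) (by simp)
        (by intro k hk
            rcases (PySem.Dict.mem_keys_insert d page k _).mp hk with rfl | hk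
            · omega
            · have := hkeys k hk; omega)]
      rw [PySem.Dict.items_insert_of_not_contains d _ hnc]
      have hfd := firstDelim_append (ls := ls) hbuf hl
      rw [goPages_of_some page hfd]
      rw [List.take_left, show (buf ++ l :: ls).drop (buf.length + 1) = ls by
        have h2 : buf ++ l :: ls = (buf ++ [l]) ++ ls := by simp
        rw [h2, show buf.length + 1 = (buf ++ [l]).length by simp, List.drop_left]]
      simp
    · simp only [Bool.not_eq_true] at hl
      simp only [List.foldl_cons, pageStepA, hl, Bool.false_eq_true, if_false]
      rw [ih _ (buf ++ [l]) page
        (by intro x hx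
            rcases List.mem_append.mp hx with hx | hx
            · exact hbuf x hx
            · simp at hx; subst hx; exact hl) hkeys]
      simp

-- ===== VERDICT (by name: the statement is the Claim_ definition above) =====
theorem page_text_map_spec : Claim_equal_page_text_map := by
  intro llm_text _
  show page_text_map llm_text = page_text_map_alt llm_text
  unfold page_text_map page_text_map_alt
  have h := loop_eq (PySem.Str.splitlines llm_text) PySem.Dict.empty [] 1
    (by simp) (by simp [PySem.Dict.keys_empty])
  simp only [List.nil_append] at h
  rw [h]
  have hfresh : ∀ p ∈ goPages (PySem.Str.splitlines llm_text) 1,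
      (PySem.Dict.empty : PySem.Dict Int String).contains p.1 = false := by
    intro p _; simp [PySem.Dict.contains_empty]
  have hfold := PySem.Dict.items_foldl_insert_fresh (goPages (PySem.Str.splitlines llm_text) 1)
    Prod.fst Prod.snd PySem.Dict.empty hfresh (goPages_keys_nodup _ _)
  have hie : (PySem.Dict.empty : PySem.Dict Int String).items = [] := rfl
  rw [hie, List.nil_append] at hfold
  rw [show (PySem.Dict.ofList (goPages (PySem.Str.splitlines llm_text) 1)).items
      = (List.foldl (fun d (a : Int × String) => d.insert a.1 a.2) PySem.Dict.empty
          (goPages (PySem.Str.splitlines llm_text) 1)).items from rfl]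
  rw [hfold, hie, List.nil_append]
  simp
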